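-- pv_equiv track=rewrite | github.com/SincereXIA/XidianCS | 专业选修课/大数据安全与隐私/Exp 实验/3_1/version_2/test2.py | divide_range
-- ===== SOURCE A (Python) =====
-- def divide_range(n):
--     start = 60
--     end = 101
--     range_length = end - start
--     segment_length = range_length // n
--     remainder = range_length % n
--     segments = []
--
--     for i in range(n):
--
--         if remainder > 0:
--             segment_end = start + segment_length + 1
--             remainder -= 1
--         else:
--             segment_end = start + segment_length
--         segments.append((start, segment_end))
--         start = segment_end
--
--     return segments
-- ===== SOURCE B (Python) =====
-- def divide_range(n):
--     q, r = divmod(41, n)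
--     return [(60 + q * i + min(i, r), 60 + q * (i + 1) + min(i + 1, r))
--             for i in range(n)]
-- ===== Notes on version B (the rewrite author's own statement) =====
-- stated objective: simpler
-- what changed: Replaced the stateful loop threading a running start and decrementing remainder with a single comprehension computing each segment boundary by the closed form 60 + q*i + min(i, r) from divmod(41, n).
import Mathlib
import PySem

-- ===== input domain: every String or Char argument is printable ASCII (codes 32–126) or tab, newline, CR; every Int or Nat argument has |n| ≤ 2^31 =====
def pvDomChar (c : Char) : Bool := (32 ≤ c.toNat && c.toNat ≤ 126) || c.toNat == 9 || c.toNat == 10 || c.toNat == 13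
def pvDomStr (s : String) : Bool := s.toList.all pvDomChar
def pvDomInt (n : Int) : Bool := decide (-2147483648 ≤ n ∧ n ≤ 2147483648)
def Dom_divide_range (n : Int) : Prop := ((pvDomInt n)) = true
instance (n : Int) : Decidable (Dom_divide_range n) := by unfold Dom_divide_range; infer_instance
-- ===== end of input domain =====

-- B replaces A's stateful loop (running start, decrementing remainder) with a
-- closed-form boundary per index: segment i is (60+q*i+min(i,r), 60+q*(i+1)+min(i+1,r)).


-- ===== PORT A =====
def divide_range (n : Int) : List (Int × Int) :=
  let start : Int := 60
  let «end» : Int := 101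
  let range_length := «end» - start
  let segment_length := PySem.Int.floordiv range_length n
  let remainder := PySem.Int.mod range_length n
  let st := (PySem.List.pyRange 0 n 1).foldl
    (fun (s : Int × Int × List (Int × Int)) _i =>
      let start := s.1
      let remainder := s.2.1
      let segments := s.2.2
      if remainder > 0 then
        let segment_end := start + segment_length + 1
        (segment_end, remainder - 1, segments ++ [(start, segment_end)])
      else
        let segment_end := start + segment_length
        (segment_end, remainder, segments ++ [(start, segment_end)]))
    (start, remainder, [])
  st.2.2

-- ===== PORT B =====
def divide_range_alt (n : Int) : List (Int × Int) :=
  let q := PySem.Int.floordiv 41 n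
  let r := PySem.Int.mod 41 n
  (PySem.List.pyRange 0 n 1).map
    (fun i => (60 + q * i + min i r, 60 + q * (i + 1) + min (i + 1) r))

-- ===== PRECONDITION & SPEC =====
-- Python A raises ZeroDivisionError at n = 0 (41 // n); excluded here.
def Pre_divide_range (n : Int) : Prop := n ≠ 0
instance (n : Int) : Decidable (Pre_divide_range n) := by unfold Pre_divide_range; infer_instance
def pvWitness_divide_range : Int := 5

def Spec_divide_range (n : Int) (out : List (Int × Int)) : Prop := out = divide_range_alt n
instance (n : Int) (out : List (Int × Int)) : Decidable (Spec_divide_range n out) := by unfold Spec_divide_range; infer_instance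

-- ===== CLAIM (what is proved, stated in full; the proofs are below) =====
def Claim_equal_divide_range : Prop := ∀ (n : Int), Dom_divide_range n → Pre_divide_range n → Spec_divide_range n (divide_range n)

-- ===== LEMMAS AND PROOFS =====


-- Loop invariant: after k iterations the state is (60 + q*k + min k r, r - min k r,
-- first k segments of B's closed form).
lemma divide_range_loop (q r : Int) (hr : 0 ≤ r) (k : Nat) :
    (PySem.List.pyRange 0 (k : Int) 1).foldl
      (fun (s : Int × Int × List (Int × Int)) _i =>
        if s.2.1 > 0 then
          (s.1 + q + 1, s.2.1 - 1, s.2.2 ++ [(s.1, s.1 + q + 1)])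
        else
          (s.1 + q, s.2.1, s.2.2 ++ [(s.1, s.1 + q)]))
      (60, r, [])
    = (60 + q * (k : Int) + min (k : Int) r, r - min (k : Int) r,
       (PySem.List.pyRange 0 (k : Int) 1).map
         (fun i => (60 + q * i + min i r, 60 + q * (i + 1) + min (i + 1) r))) := by
  induction k with
  | zero =>
    rw [PySem.List.pyRange_one_eq_nil (by norm_num)]
    simp only [List.foldl_nil, List.map_nil, Prod.mk.injEq]
    refine ⟨by omega, by omega, by trivial⟩
  | succ k ih =>
    have hsplit : PySem.List.pyRange 0 ((k : Int) + 1) 1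
        = PySem.List.pyRange 0 (k : Int) 1 ++ [(k : Int)] := by
      simpa using PySem.List.pyRange_one_succ_right (show (0:Int) ≤ (k:Int) by omega)
    push_cast
    rw [hsplit, List.foldl_append, List.map_append, ih,
      List.foldl_cons, List.foldl_nil]
    dsimp only
    by_cases hcase : (k : Int) < r
    · have h1 : min (k : Int) r = (k : Int) := by omega
      have h2 : min ((k : Int) + 1) r = (k : Int) + 1 := by omega
      rw [if_pos (by rw [h1]; omega)]
      simp only [List.map_cons, List.map_nil, Prod.mk.injEq,
        List.append_cancel_left_eq, List.cons.injEq, and_true, h1, h2]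
      repeat' apply And.intro
      all_goals first | trivial | rfl | ring
    · have h1 : min (k : Int) r = r := by omega
      have h2 : min ((k : Int) + 1) r = r := by omega
      rw [if_neg (by rw [h1]; omega)]
      simp only [List.map_cons, List.map_nil, Prod.mk.injEq,
        List.append_cancel_left_eq, List.cons.injEq, and_true, h1, h2]
      repeat' apply And.intro
      all_goals first | trivial | rfl | ring

-- ===== VERDICT (by name: the statement is the Claim_ definition above) =====
theorem divide_range_spec : Claim_equal_divide_range := by
  intro n _ hn
  unfold Spec_divide_range divide_range divide_range_alt
  by_cases hpos : 0 < n
  · have hr : 0 ≤ PySem.Int.mod 41 n := PySem.Int.mod_nonneg 41 hpos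
    have hk : ((n.toNat : Nat) : Int) = n := Int.toNat_of_nonneg (le_of_lt hpos)
    simp only []
    rw [show (101 : Int) - 60 = 41 by norm_num, ← hk]
    rw [divide_range_loop (PySem.Int.floordiv 41 ((n.toNat : Nat) : Int))
      (PySem.Int.mod 41 ((n.toNat : Nat) : Int)) (by rw [hk]; exact hr) n.toNat]
  · have hle : n ≤ 0 := by omega
    simp [PySem.List.pyRange_one_eq_nil hle]
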